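-- pv_equiv track=rewrite | github.com/DB-121143/UDA-Bench | Query/Art/build_mixed.py | get_subcategory_combinations
-- ===== SOURCE A (Python) =====
-- from typing import List, Dict, Tuple, Set
-- from itertools import product
--
-- def get_subcategory_combinations(operators: Tuple[str, ...]) -> List[Dict[str, int]]:
--     """
--     Generate all subcategory combinations for given operators.
--
--     Args:
--         operators: Tuple of operator names
--
--     Returns:
--         List of dicts mapping operator to subcategory number
--     """
--     subcategory_ranges = []
--     operator_list = list(operators)
--
--     for op in operator_list:
--         if op == "filter":
--             subcategory_ranges.append(range(1, 7))  # 1-6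
--         elif op == "join":
--             subcategory_ranges.append(range(1, 3))  # 1-2
--         else:
--             subcategory_ranges.append(range(1, 2))  # just 1
--
--     combinations = []
--     for combo in product(*subcategory_ranges):
--         combinations.append({op: subcat for op, subcat in zip(operator_list, combo)})
--
--     return combinations
-- ===== SOURCE B (Python) =====
-- def get_subcategory_combinations(operators):
--     # Incremental expansion: thread a growing list of partial dicts through the
--     # operators instead of materializing full product tuples and zipping them.
--     result = [{}]
--     for op in operators:
--         if op == "filter":
--             r = range(1, 7)
--         elif op == "join":
--             r = range(1, 3)
--         else:
--             r = range(1, 2)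
--         result = [{**d, op: v} for d in result for v in r]
--     return result
-- ===== Notes on version B (the rewrite author's own statement) =====
-- stated objective: alternative
-- what changed: Replaces itertools.product over precomputed range lists plus zip/dict-comprehension with incremental expansion: a single list of partial assignment dicts is extended operator by operator.
import Mathlib
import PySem

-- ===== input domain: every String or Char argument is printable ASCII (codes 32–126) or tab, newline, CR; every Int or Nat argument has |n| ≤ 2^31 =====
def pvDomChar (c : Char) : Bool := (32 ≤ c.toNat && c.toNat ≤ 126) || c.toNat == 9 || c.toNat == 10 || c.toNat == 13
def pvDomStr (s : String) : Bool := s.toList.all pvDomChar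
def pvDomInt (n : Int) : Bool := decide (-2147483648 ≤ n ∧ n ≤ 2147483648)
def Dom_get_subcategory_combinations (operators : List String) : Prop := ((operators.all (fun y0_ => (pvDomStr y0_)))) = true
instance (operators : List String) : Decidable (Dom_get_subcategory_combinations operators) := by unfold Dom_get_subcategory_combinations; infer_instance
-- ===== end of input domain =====

-- B replaces itertools.product + zip/dict-comprehension with incremental expansion of partial dicts (alternative decomposition, same cost).

-- ===== PORT A =====
-- itertools.product over a list of ranges, first range outermost (ported by hand, exact).
def pvProduct : List (List Int) → List (List Int)
  | [] => [[]]
  | r :: rs => r.flatMap (fun x => (pvProduct rs).map (fun c => x :: c))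

def get_subcategory_combinations (operators : List String) : List (List (String × Int)) :=
  let operator_list := operators
  let subcategory_ranges : List (List Int) :=
    operator_list.foldl (fun acc op =>
      acc ++ [if op == "filter" then PySem.List.pyRange 1 7 1
              else if op == "join" then PySem.List.pyRange 1 3 1
              else PySem.List.pyRange 1 2 1]) []
  let combinations : List (List (String × Int)) :=
    (pvProduct subcategory_ranges).foldl (fun acc combo =>
      acc ++ [((operator_list.zip combo).foldl
                 (fun d p => d.insert p.1 p.2) PySem.Dict.empty).items]) []
  combinations

-- ===== PORT B =====
def get_subcategory_combinations_alt (operators : List String) : List (List (String × Int)) :=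
  (operators.foldl (fun result op =>
      result.flatMap (fun d =>
        (if op == "filter" then PySem.List.pyRange 1 7 1
         else if op == "join" then PySem.List.pyRange 1 3 1
         else PySem.List.pyRange 1 2 1).map (fun v => d.insert op v)))
    [PySem.Dict.empty]).map (fun d => d.items)

-- ===== PRECONDITION & SPEC =====
def Spec_get_subcategory_combinations (operators : List String) (out : List (List (String × Int))) : Prop := out = get_subcategory_combinations_alt operators
instance (operators : List String) (out : List (List (String × Int))) : Decidable (Spec_get_subcategory_combinations operators out) := by unfold Spec_get_subcategory_combinations; infer_instance

-- ===== CLAIM (what is proved, stated in full; the proofs are below) =====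
def Claim_equal_get_subcategory_combinations : Prop := ∀ (operators : List String), Dom_get_subcategory_combinations operators → Spec_get_subcategory_combinations operators (get_subcategory_combinations operators)

-- ===== LEMMAS AND PROOFS =====

def pvRng (op : String) : List Int :=
  if op == "filter" then PySem.List.pyRange 1 7 1
  else if op == "join" then PySem.List.pyRange 1 3 1
  else PySem.List.pyRange 1 2 1

-- the foldl-append building of subcategory_ranges is a map
lemma pvRangesA_eq (ops : List String) (acc : List (List Int)) :
    ops.foldl (fun acc op => acc ++ [pvRng op]) acc = acc ++ ops.map pvRng := by
  induction ops generalizing acc with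
  | nil => simp
  | cons op ops ih => simp [List.foldl_cons, ih]

-- accumulating foldl-append over the product is a map
lemma pvCombA_eq (cs : List (List Int)) (f : List Int → List (String × Int))
    (acc : List (List (String × Int))) :
    cs.foldl (fun acc c => acc ++ [f c]) acc = acc ++ cs.map f := by
  induction cs generalizing acc with
  | nil => simp
  | cons c cs ih => simp [List.foldl_cons, ih]

-- main invariant: incremental expansion = product-then-zip-insert, from any dict pool
lemma pvMain (ops : List String) (ds : List (PySem.Dict String Int)) :
    ops.foldl (fun result op =>
      result.flatMap (fun d => (pvRng op).map (fun v => d.insert op v))) ds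
    = ds.flatMap (fun d => (pvProduct (ops.map pvRng)).map
        (fun c => (ops.zip c).foldl (fun d p => d.insert p.1 p.2) d)) := by
  induction ops generalizing ds with
  | nil => simp [pvProduct]
  | cons op ops ih =>
      rw [List.foldl_cons, ih]
      simp only [List.map_cons, pvProduct, List.flatMap_assoc, List.map_flatMap,
        List.flatMap_map, List.map_map]
      simp only [Function.comp_def, List.zip_cons_cons, List.foldl_cons]

-- ===== VERDICT (by name: the statement is the Claim_ definition above) =====
theorem get_subcategory_combinations_spec : Claim_equal_get_subcategory_combinations := by
  intro operators _
  show get_subcategory_combinations operators = get_subcategory_combinations_alt operators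
  unfold get_subcategory_combinations get_subcategory_combinations_alt
  simp only []
  rw [show (fun (acc : List (List Int)) (op : String) =>
        acc ++ [if op == "filter" then PySem.List.pyRange 1 7 1
                else if op == "join" then PySem.List.pyRange 1 3 1
                else PySem.List.pyRange 1 2 1]) = (fun acc op => acc ++ [pvRng op]) from rfl,
      show (fun (result : List (PySem.Dict String Int)) (op : String) =>
        result.flatMap (fun d =>
          (if op == "filter" then PySem.List.pyRange 1 7 1
           else if op == "join" then PySem.List.pyRange 1 3 1
           else PySem.List.pyRange 1 2 1).map (fun v => d.insert op v))) =
        (fun result op => result.flatMap (fun d => (pvRng op).map (fun v => d.insert op v)))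
        from rfl,
      pvRangesA_eq, pvMain, pvCombA_eq]
  simp [List.map_map]
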